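-- pv_equiv track=rewrite | github.com/ndigati/aoc_2021 | python/day01/day01.py | getTriples
-- ===== SOURCE A (Python) =====
-- from typing import List
--
-- def getTriples(input: List[int]) -> List[int]:
--     result = []
--     index = 0
--     while index < len(input):
--         if index+3 > len(input):
--             # return early we can't form another triple
--             return result
--
--         i1 = input[index]
--         i2 = input[index+1]
--         i3 = input[index+2]
--         result.append(i1+i2+i3)
--         index += 1
--     return result
-- ===== SOURCE B (Python) =====
-- def getTriples(input):
--     # prefix sums: P[k] = sum of the first k elements
--     P = [0]
--     for x in input:
--         P.append(P[-1] + x)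
--     return [P[i + 3] - P[i] for i in range(len(input) - 2)]
-- ===== Notes on version B (the rewrite author's own statement) =====
-- stated objective: faster
-- what changed: Replaces the index-guarded while loop that re-reads and sums three raw elements per window with a prefix-sum table built once and a list comprehension taking two table lookups per window.
import Mathlib
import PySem

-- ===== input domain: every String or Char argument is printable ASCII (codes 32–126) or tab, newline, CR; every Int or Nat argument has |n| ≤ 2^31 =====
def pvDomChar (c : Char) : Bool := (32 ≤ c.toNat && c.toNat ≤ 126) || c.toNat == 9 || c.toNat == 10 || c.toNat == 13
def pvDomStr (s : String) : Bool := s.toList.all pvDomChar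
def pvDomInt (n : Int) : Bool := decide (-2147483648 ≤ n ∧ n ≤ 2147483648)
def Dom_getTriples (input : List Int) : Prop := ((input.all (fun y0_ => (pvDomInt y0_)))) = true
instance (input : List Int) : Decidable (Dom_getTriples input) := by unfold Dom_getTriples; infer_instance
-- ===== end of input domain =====

-- B re-implements the sliding triple sums via a prefix-sum table; same O(n) cost, different decomposition.

-- ===== PORT A =====
-- the while loop of A: appends input[index]+input[index+1]+input[index+2], index += 1
def getTriplesLoop (input : List Int) (result : List Int) (index : Nat) : List Int :=
  if index < input.length then
    if input.length < index + 3 then result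
    else
      getTriplesLoop input
        (result ++ [PySem.List.pyGetD input (index : Int) 0 +
                    PySem.List.pyGetD input ((index : Int) + 1) 0 +
                    PySem.List.pyGetD input ((index : Int) + 2) 0])
        (index + 1)
  else result
termination_by input.length - index

def getTriples (input : List Int) : List Int := getTriplesLoop input [] 0

-- ===== PORT B =====
def getTriples_alt (input : List Int) : List Int :=
  let P := input.foldl (fun acc x => acc ++ [PySem.List.pyGetD acc (-1) 0 + x]) [0]
  (PySem.List.pyRange 0 ((input.length : Int) - 2) 1).map
    (fun i => PySem.List.pyGetD P (i + 3) 0 - PySem.List.pyGetD P i 0)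

-- ===== PRECONDITION & SPEC =====
def Spec_getTriples (input : List Int) (out : List Int) : Prop := out = getTriples_alt input
instance (input : List Int) (out : List Int) : Decidable (Spec_getTriples input out) := by unfold Spec_getTriples; infer_instance

-- ===== CLAIM (what is proved, stated in full; the proofs are below) =====
def Claim_equal_getTriples : Prop := ∀ (input : List Int), Dom_getTriples input → Spec_getTriples input (getTriples input)

-- ===== LEMMAS AND PROOFS =====

-- common reference value: the window sum starting at position k
def pvTri (input : List Int) (k : Nat) : Int :=
  input.getD k 0 + input.getD (k + 1) 0 + input.getD (k + 2) 0

lemma getTriplesLoop_eq (input : List Int) (result : List Int) (index : Nat) :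
    getTriplesLoop input result index =
      result ++ (List.range (input.length - 2 - index)).map (fun k => pvTri input (index + k)) := by
  generalize hm : input.length - index = m
  induction m generalizing result index with
  | zero =>
    rw [getTriplesLoop]
    have : ¬ index < input.length := by omega
    simp [this]
    omega
  | succ m ih =>
    rw [getTriplesLoop]
    by_cases h1 : index < input.length
    · by_cases h2 : input.length < index + 3
      · simp [h1, h2]
        omega
      · simp only [h1, h2, if_true, if_false]
        rw [ih _ (index + 1) (by omega)]
        have hr : input.length - 2 - index = (input.length - 2 - (index + 1)) + 1 := by omega
        rw [hr, List.range_succ_eq_map]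
        simp only [List.map_cons, List.map_map, List.append_assoc, List.singleton_append]
        congr 1
        congr 1
        · unfold pvTri
          have h0 : index < input.length := by omega
          have ha : PySem.List.pyGetD input (index : Int) 0 = input.getD index 0 :=
            PySem.List.pyGetD_natCast ..
          have hb : PySem.List.pyGetD input ((index : Int) + 1) 0 = input.getD (index + 1) 0 := by
            have h : ((index : Int) + 1) = ((index + 1 : Nat) : Int) := by push_cast; ring
            rw [h]; exact PySem.List.pyGetD_natCast ..
          have hc : PySem.List.pyGetD input ((index : Int) + 2) 0 = input.getD (index + 2) 0 := by
            have h : ((index : Int) + 2) = ((index + 2 : Nat) : Int) := by push_cast; ring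
            rw [h]; exact PySem.List.pyGetD_natCast ..
          rw [ha, hb, hc]; norm_num
        · apply List.map_congr_left
          intro k _
          have h : index + 1 + k = index + (k + 1) := by omega
          simp only [Function.comp_apply, h]
    · have h0 : input.length - 2 - index = 0 := by omega
      simp [h1, h0]

lemma foldlP (xs : List Int) : ∀ (pre : List Int) (s : Int),
    xs.foldl (fun acc x => acc ++ [PySem.List.pyGetD acc (-1) 0 + x]) (pre ++ [s]) =
      (pre ++ [s]) ++ (List.range xs.length).map (fun k => s + (xs.take (k + 1)).sum) := by
  induction xs with
  | nil => simp
  | cons x xs ih =>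
    intro pre s
    simp only [List.foldl_cons, PySem.List.pyGetD_neg_one_append_singleton]
    rw [List.append_assoc pre [s] [s + x]]
    have := ih (pre ++ [s]) (s + x)
    simp only [List.append_assoc] at this ⊢
    rw [this]
    congr 1
    congr 1
    rw [List.length_cons, List.range_succ_eq_map]
    simp only [List.map_cons, List.map_map, List.singleton_append]
    congr 1
    · simp
    · apply List.map_congr_left
      intro k _
      simp [Function.comp]
      ring

lemma P_getD (input : List Int) (k : Nat) (hk : k ≤ input.length) :
    PySem.List.pyGetD
      (input.foldl (fun acc x => acc ++ [PySem.List.pyGetD acc (-1) 0 + x]) [0]) (k : Int) 0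
      = (input.take k).sum := by
  have h0 : ([] : List Int) ++ [(0:Int)] = [0] := by simp
  rw [← h0, foldlP]
  rw [PySem.List.pyGetD_natCast]
  cases k with
  | zero => simp
  | succ k =>
    have hk' : k < input.length := by omega
    rw [List.getD_eq_getElem]
    · simp [hk']
    · simp; omega

lemma alt_eq (input : List Int) :
    getTriples_alt input = (List.range (input.length - 2)).map (fun k => pvTri input k) := by
  unfold getTriples_alt
  rw [PySem.List.pyRange_one]
  rw [List.map_map]
  have hn : ((input.length : Int) - 2 - 0).toNat = input.length - 2 := by omega
  rw [hn]
  apply List.map_congr_left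
  intro k hk
  rw [List.mem_range] at hk
  simp only [Function.comp_apply, zero_add]
  have h3 : ((k : Int) + 3) = ((k + 3 : Nat) : Int) := by push_cast; ring
  rw [h3, P_getD input (k+3) (by omega), P_getD input k (by omega)]
  unfold pvTri
  have hsum : (input.take (k + 3)).sum
      = (input.take k).sum + (input[k] + input[k + 1] + input[k + 2]) := by
    have e3 : (input.take (k + 2 + 1)).sum = (input.take (k + 2)).sum + input[k + 2] :=
      List.sum_take_succ _ _ (by omega)
    have e2 : (input.take (k + 1 + 1)).sum = (input.take (k + 1)).sum + input[k + 1] :=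
      List.sum_take_succ _ _ (by omega)
    have e1 : (input.take (k + 1)).sum = (input.take k).sum + input[k] :=
      List.sum_take_succ _ _ (by omega)
    rw [show k + 3 = k + 2 + 1 from rfl, e3, e2, e1]
    ring
  rw [hsum]
  have g1 : input.getD k 0 = input[k] := List.getD_eq_getElem _ _ (by omega)
  have g2 : input.getD (k + 1) 0 = input[k + 1] := List.getD_eq_getElem _ _ (by omega)
  have g3 : input.getD (k + 2) 0 = input[k + 2] := List.getD_eq_getElem _ _ (by omega)
  rw [g1, g2, g3]
  ring

-- ===== VERDICT (by name: the statement is the Claim_ definition above) =====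
theorem getTriples_spec : Claim_equal_getTriples := by
  intro input _
  unfold Spec_getTriples getTriples
  rw [getTriplesLoop_eq, alt_eq]
  simp
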